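-- pv_equiv track=rewrite | github.com/RayFong/DepParser | util.py | get_sent_ec
-- ===== SOURCE A (Python) =====
-- def get_sent_ec(sent):
-- 	ecs, cnt = [], 0
-- 	for item in sent:
-- 		if item[0] == '*PRO*':
-- 			cnt += 1
-- 		else:
-- 			ecs.append(cnt)
-- 			cnt = 0
-- 	return ecs
-- ===== SOURCE B (Python) =====
-- from itertools import groupby
--
-- def get_sent_ec(sent):
--     ecs, pending = [], 0
--     for is_pro, group in groupby(sent, key=lambda item: item[0] == '*PRO*'):
--         run = list(group)
--         if is_pro:
--             pending += len(run)
--         else: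
--             ecs.append(pending)
--             ecs.extend([0] * (len(run) - 1))
--             pending = 0
--     return ecs
-- ===== Notes on version B (the rewrite author's own statement) =====
-- stated objective: alternative
-- what changed: B traverses per run of equal-key elements via itertools.groupby (appending pending then zeros for each non-PRO run) instead of A's element-by-element running counter.
import Mathlib
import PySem

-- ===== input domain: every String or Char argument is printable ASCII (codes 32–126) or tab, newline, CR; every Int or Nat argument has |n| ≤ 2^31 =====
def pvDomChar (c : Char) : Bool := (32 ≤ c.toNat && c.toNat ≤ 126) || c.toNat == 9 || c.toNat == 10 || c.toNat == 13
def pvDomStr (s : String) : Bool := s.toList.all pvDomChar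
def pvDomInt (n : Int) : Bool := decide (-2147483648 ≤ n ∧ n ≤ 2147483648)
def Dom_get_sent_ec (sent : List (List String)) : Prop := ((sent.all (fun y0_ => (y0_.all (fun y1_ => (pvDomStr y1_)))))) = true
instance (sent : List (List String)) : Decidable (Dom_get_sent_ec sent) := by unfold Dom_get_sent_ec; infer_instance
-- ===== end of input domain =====

-- B re-implements A per run of equal-key elements (groupby) instead of an element-wise running counter.
-- Pre_ excludes inputs containing an empty inner list, on which both Pythons raise IndexError (item[0]).
-- ===== PORT A =====
def keyPro (item : List String) : Bool := ((PySem.List.pyGet? item 0).getD "") == "*PRO*"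
  -- item[0] == '*PRO*'; the (getD "") default is never taken under Pre_ (item nonempty)

def loopA : List (List String) → List Int → Int → List Int
  | [], ecs, _ => ecs
  | item :: rest, ecs, cnt =>
    if keyPro item then loopA rest ecs (cnt + 1)
    else loopA rest (ecs ++ [cnt]) 0

def get_sent_ec (sent : List (List String)) : List Int := loopA sent [] 0

-- ===== PORT B =====
-- itertools.groupby: the list of (key, run length) for maximal runs of equal key
def groupRuns : List (List String) → List (Bool × Nat)
  | [] => []
  | x :: xs =>
    match groupRuns xs with
    | [] => [(keyPro x, 1)]
    | (b, n) :: rs =>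
      if keyPro x = b then (b, n + 1) :: rs else (keyPro x, 1) :: (b, n) :: rs

def loopB : List (Bool × Nat) → List Int → Int → List Int
  | [], ecs, _ => ecs
  | (isPro, n) :: rs, ecs, pending =>
    if isPro then loopB rs ecs (pending + (n : Int))
    else loopB rs (ecs ++ [pending] ++ List.replicate (n - 1) 0) 0

def get_sent_ec_alt (sent : List (List String)) : List Int := loopB (groupRuns sent) [] 0

-- ===== PRECONDITION & SPEC =====
-- excludes exactly the inputs where A raises IndexError: some item is the empty list
def Pre_get_sent_ec (sent : List (List String)) : Prop := ∀ item ∈ sent, item ≠ []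
instance (sent : List (List String)) : Decidable (Pre_get_sent_ec sent) := by
  unfold Pre_get_sent_ec; infer_instance
def pvWitness_get_sent_ec : List (List String) :=
  [["*PRO*"], ["*PRO*"], ["dog", "NN"], ["ran"]]
def Spec_get_sent_ec (sent : List (List String)) (out : List Int) : Prop := out = get_sent_ec_alt sent
instance (sent : List (List String)) (out : List Int) : Decidable (Spec_get_sent_ec sent out) := by unfold Spec_get_sent_ec; infer_instance

-- ===== CLAIM (what is proved, stated in full; the proofs are below) =====
def Claim_equal_get_sent_ec : Prop := ∀ (sent : List (List String)), Dom_get_sent_ec sent → Pre_get_sent_ec sent → Spec_get_sent_ec sent (get_sent_ec sent)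

-- ===== LEMMAS AND PROOFS =====
-- accumulator-free versions of the two loops
def resA : List (List String) → Int → List Int
  | [], _ => []
  | item :: rest, cnt =>
    if keyPro item then resA rest (cnt + 1) else cnt :: resA rest 0

def resB : List (Bool × Nat) → Int → List Int
  | [], _ => []
  | (isPro, n) :: rs, pending =>
    if isPro then resB rs (pending + (n : Int))
    else pending :: (List.replicate (n - 1) 0 ++ resB rs 0)

theorem loopA_acc (sent : List (List String)) :
    ∀ ecs cnt, loopA sent ecs cnt = ecs ++ resA sent cnt := by
  induction sent with
  | nil => intro ecs cnt; simp [loopA, resA]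
  | cons item rest ih =>
    intro ecs cnt
    by_cases h : keyPro item = true <;> simp [loopA, resA, h, ih]

theorem loopB_acc (rs : List (Bool × Nat)) :
    ∀ ecs p, loopB rs ecs p = ecs ++ resB rs p := by
  induction rs with
  | nil => intro ecs p; simp [loopB, resB]
  | cons r rest ih =>
    intro ecs p
    obtain ⟨isPro, n⟩ := r
    by_cases h : isPro = true <;> simp [loopB, resB, h, ih]

theorem groupRuns_head_pos (xs : List (List String)) :
    ∀ b n rs, groupRuns xs = (b, n) :: rs → 1 ≤ n := by
  cases xs with
  | nil => intro b n rs h; simp [groupRuns] at h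
  | cons x xs' =>
    intro b n rs h
    rw [groupRuns] at h
    rcases hg : groupRuns xs' with _ | ⟨⟨b', n'⟩, rs'⟩ <;> rw [hg] at h
    · simp at h; omega
    · by_cases hk : keyPro x = b' <;> simp [hk] at h <;> omega

theorem resA_eq_resB (sent : List (List String)) :
    ∀ cnt, resA sent cnt = resB (groupRuns sent) cnt := by
  induction sent with
  | nil => intro cnt; simp [resA, groupRuns, resB]
  | cons x xs ih =>
    intro cnt
    by_cases hk : keyPro x = true
    · rcases hg : groupRuns xs with _ | ⟨⟨b, n⟩, rs⟩
      · simp [resA, hk, groupRuns, hg, resB, ih]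
      · by_cases hb : b = true
        · have : groupRuns (x :: xs) = (true, n + 1) :: rs := by
            simp [groupRuns, hg, hk, hb]
          rw [resA]
          simp only [hk, this, ih (cnt + 1), hg, resB, hb]
          have : cnt + 1 + (n : Int) = cnt + ((n : Int) + 1) := by ring
          simp [this]
        · have hbf : b = false := by simpa using hb
          have : groupRuns (x :: xs) = (true, 1) :: (b, n) :: rs := by
            simp [groupRuns, hg, hk, hbf]
          rw [resA]
          simp [hk, this, resB, ih (cnt + 1), hg]
    · have hkf : keyPro x = false := by simpa using hk
      rcases hg : groupRuns xs with _ | ⟨⟨b, n⟩, rs⟩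
      · simp [resA, hkf, groupRuns, hg, resB, ih 0]
      · by_cases hb : b = true
        · have : groupRuns (x :: xs) = (false, 1) :: (b, n) :: rs := by
            simp [groupRuns, hg, hkf, hb]
          rw [resA]
          simp [hkf, this, resB, ih 0, hg]
        · have hbf : b = false := by simpa using hb
          have hgr : groupRuns (x :: xs) = (false, n + 1) :: rs := by
            simp [groupRuns, hg, hkf, hbf]
          have hn := groupRuns_head_pos xs _ _ _ hg
          obtain ⟨m, rfl⟩ : ∃ m, n = m + 1 := ⟨n - 1, by omega⟩
          rw [resA]
          simp [hkf, hgr, resB, ih 0, hg, hbf, List.replicate_succ]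

-- ===== VERDICT (by name: the statement is the Claim_ definition above) =====
theorem get_sent_ec_spec : Claim_equal_get_sent_ec := by
  intro sent _ _
  unfold Spec_get_sent_ec get_sent_ec get_sent_ec_alt
  rw [loopA_acc, loopB_acc, resA_eq_resB]
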